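-- pv_equiv track=rewrite | github.com/semoule/adventofcode2021 | 03/solution.py | get_least
-- ===== SOURCE A (Python) =====
-- def get_least(mylist, index):
--   zero_list = []
--   one_list = []
--   for item in mylist:
--     if item[index] == "0":
--       zero_list.append(item)
--     else:
--       one_list.append(item)
--   if len(zero_list) > len(one_list):
--     return one_list
--   else:
--     return zero_list
-- ===== SOURCE B (Python) =====
-- def get_least(mylist, index):
--   s = sorted(mylist, key=lambda item: item[index] != "0")
--   z = 0
--   while z < len(s) and s[z][index] == "0":
--     z += 1
--   return s[z:] if z > len(s) - z else s[:z]
-- ===== Notes on version B (the rewrite author's own statement) =====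
-- stated objective: alternative
-- what changed: Instead of partitioning into two lists in one scan, B stably sorts the list by the boolean key item[index] != '0' so the zero-group becomes a contiguous prefix, finds the split point with a leading-zero scan, and returns one slice of the sorted list.
import Mathlib
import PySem

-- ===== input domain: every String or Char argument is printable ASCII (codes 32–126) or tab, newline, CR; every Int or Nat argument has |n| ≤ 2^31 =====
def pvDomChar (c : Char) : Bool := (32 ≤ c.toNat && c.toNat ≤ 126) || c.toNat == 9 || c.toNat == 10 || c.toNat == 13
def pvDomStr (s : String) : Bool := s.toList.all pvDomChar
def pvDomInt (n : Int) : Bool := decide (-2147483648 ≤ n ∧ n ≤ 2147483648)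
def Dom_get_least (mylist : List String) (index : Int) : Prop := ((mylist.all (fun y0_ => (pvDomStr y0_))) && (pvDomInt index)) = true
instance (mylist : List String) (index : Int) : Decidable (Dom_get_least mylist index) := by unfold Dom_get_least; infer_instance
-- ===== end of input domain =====

-- B replaces A's partition loop by a stable sort on the boolean key item[index] != "0" (zeros become a prefix),
-- a leading-zero scan for the split point, and one slice (alternative algorithm; not faster).

-- ===== PORT A =====
def get_least (mylist : List String) (index : Int) : List String :=
  let p := mylist.foldl
    (fun (st : List String × List String) item =>
      if PySem.Str.pyGet? item index = some '0' then (st.1 ++ [item], st.2)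
      else (st.1, st.2 ++ [item]))
    ([], [])
  if p.1.length > p.2.length then p.2 else p.1

-- ===== PORT B =====
-- the while loop "z = 0; while z < len(s) and s[z][index] == '0': z += 1" as structural recursion
def pvLeadZeros (index : Int) : List String → Nat
  | [] => 0
  | x :: xs => if PySem.Str.pyGet? x index = some '0' then pvLeadZeros index xs + 1 else 0

-- Python's boolean sort key (False < True) is ported as the Int key 0/1
def get_least_alt (mylist : List String) (index : Int) : List String :=
  let s := PySem.List.sorted mylist
    (fun item => if PySem.Str.pyGet? item index = some '0' then (0 : Int) else 1) false
  let z : Int := (pvLeadZeros index s : Nat)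
  if z > (s.length : Int) - z then PySem.List.slice s (some z) none
  else PySem.List.slice s none (some z)

-- ===== PRECONDITION & SPEC =====
-- Pre_ excludes exactly the inputs where item[index] raises IndexError for some item.
def Pre_get_least (mylist : List String) (index : Int) : Prop :=
  ∀ s ∈ mylist, PySem.Raise.InRange s.toList.length index
instance (mylist : List String) (index : Int) : Decidable (Pre_get_least mylist index) := by
  unfold Pre_get_least; infer_instance
def pvWitness_get_least : List String × Int := (["010", "110", "001"], 1)

def Spec_get_least (mylist : List String) (index : Int) (out : List String) : Prop := out = get_least_alt mylist index
instance (mylist : List String) (index : Int) (out : List String) : Decidable (Spec_get_least mylist index out) := by unfold Spec_get_least; infer_instance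

-- ===== CLAIM =====
def Claim_equal_get_least : Prop := ∀ (mylist : List String) (index : Int), Dom_get_least mylist index → Pre_get_least mylist index → Spec_get_least mylist index (get_least mylist index)

-- ===== LEMMAS AND PROOFS =====

lemma pv_partition_foldl (mylist : List String) (p : String → Prop) [DecidablePred p]
    (a b : List String) :
    mylist.foldl (fun (st : List String × List String) item =>
      if p item then (st.1 ++ [item], st.2) else (st.1, st.2 ++ [item])) (a, b)
    = (a ++ mylist.filter (fun s => decide (p s)),
       b ++ mylist.filter (fun s => !(decide (p s)))) := by
  induction mylist generalizing a b with
  | nil => simp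
  | cons x xs ih =>
    by_cases h : p x <;> simp [h, ih]

lemma pv_insertBy_skip {α : Type} (before : α → α → Bool) (x : α) (zs os : List α)
    (h : ∀ y ∈ zs, before x y = false) :
    PySem.List.insertBy before x (zs ++ os) = zs ++ PySem.List.insertBy before x os := by
  induction zs with
  | nil => simp
  | cons y ys ih =>
    have hy : before x y = false := h y (by simp)
    simp [PySem.List.insertBy, hy]
    exact ih (fun z hz => h z (by simp [hz]))

-- the stable insertion sort with a 0/1 key is exactly filter-true ++ filter-false
lemma pv_fold_insertBy_01 (p : String → Prop) [DecidablePred p] (l zs os : List String)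
    (hz : ∀ y ∈ zs, p y) (ho : ∀ y ∈ os, ¬ p y) :
    l.foldl (fun acc x => PySem.List.insertBy
        (fun a b => decide ((if p a then (0 : Int) else 1) < (if p b then (0 : Int) else 1))) x acc)
      (zs ++ os)
    = (zs ++ l.filter (fun y => decide (p y))) ++ (os ++ l.filter (fun y => !(decide (p y)))) := by
  induction l generalizing zs os with
  | nil => simp
  | cons x xs ih =>
    by_cases hx : p x
    · have hins : PySem.List.insertBy
          (fun a b => decide ((if p a then (0 : Int) else 1) < (if p b then (0 : Int) else 1))) x (zs ++ os)
          = (zs ++ [x]) ++ os := by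
        rw [pv_insertBy_skip _ _ _ _ (by intro y hy; simp [hx, hz y hy])]
        cases os with
        | nil => simp [PySem.List.insertBy]
        | cons o os' =>
          have : ¬ p o := ho o (by simp)
          simp [PySem.List.insertBy, hx, this]
      have := ih (zs ++ [x]) os
        (by intro y hy; rcases List.mem_append.1 hy with h | h
            · exact hz y h
            · simp at h; subst h; exact hx) ho
      simp only [List.foldl_cons, hins, this]
      simp [hx]
    · have hskip : ∀ y ∈ zs ++ os,
          (fun a b => decide ((if p a then (0 : Int) else 1) < (if p b then (0 : Int) else 1))) x y = false := by
        intro y hy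
        rcases List.mem_append.1 hy with h | h
        · simp [hz y h, hx]
        · simp [ho y h, hx]
      have hins := pv_insertBy_skip
        (fun a b => decide ((if p a then (0 : Int) else 1) < (if p b then (0 : Int) else 1))) x (zs ++ os) []
        (by simpa using hskip)
      simp only [List.append_nil] at hins
      have := ih zs (os ++ [x]) hz
        (by intro y hy; rcases List.mem_append.1 hy with h | h
            · exact ho y h
            · simp at h; subst h; exact hx)
      simp only [List.foldl_cons, hins, PySem.List.insertBy, List.append_assoc, this]
      simp [hx]

lemma pv_lead_app (index : Int) (l r : List String)
    (hl : ∀ y ∈ l, PySem.Str.pyGet? y index = some '0')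
    (hr : ∀ y ys, r = y :: ys → ¬ PySem.Str.pyGet? y index = some '0') :
    pvLeadZeros index (l ++ r) = l.length := by
  induction l with
  | nil =>
    cases r with
    | nil => simp [pvLeadZeros]
    | cons y ys =>
      have := hr y ys rfl
      simp only [List.nil_append, pvLeadZeros, List.length_nil]
      rw [if_neg this]
  | cons x xs ih =>
    have hx := hl x (by simp)
    simp only [List.cons_append, pvLeadZeros, List.length_cons]
    rw [if_pos hx, ih (fun y hy => hl y (by simp [hy]))]

-- ===== VERDICT =====
theorem get_least_spec : Claim_equal_get_least := by
  intro mylist index _ _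
  unfold Spec_get_least get_least get_least_alt
  have hsorted : PySem.List.sorted mylist
      (fun item => if PySem.Str.pyGet? item index = some '0' then (0 : Int) else 1) false
      = mylist.filter (fun y => decide (PySem.Str.pyGet? y index = some '0'))
        ++ mylist.filter (fun y => !(decide (PySem.Str.pyGet? y index = some '0'))) := by
    rw [PySem.List.sorted_eq_foldl_insertBy]
    simpa using pv_fold_insertBy_01 (fun item => PySem.Str.pyGet? item index = some '0') mylist [] []
      (by simp) (by simp)
  have hlead : pvLeadZeros index
      (mylist.filter (fun y => decide (PySem.Str.pyGet? y index = some '0'))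
        ++ mylist.filter (fun y => !(decide (PySem.Str.pyGet? y index = some '0'))))
      = (mylist.filter (fun y => decide (PySem.Str.pyGet? y index = some '0'))).length := by
    apply pv_lead_app
    · intro y hy
      simpa using List.of_mem_filter hy
    · intro y ys hys
      have hy : y ∈ mylist.filter (fun y => !(decide (PySem.Str.pyGet? y index = some '0'))) := by
        rw [hys]; simp
      simpa using List.of_mem_filter hy
  rw [pv_partition_foldl mylist (fun item => PySem.Str.pyGet? item index = some '0')]
  simp only [List.nil_append, hsorted, hlead]
  set f0 := mylist.filter (fun y => decide (PySem.Str.pyGet? y index = some '0')) with hf0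
  set f1 := mylist.filter (fun y => !(decide (PySem.Str.pyGet? y index = some '0'))) with hf1
  have hlen : (f0 ++ f1).length = f0.length + f1.length := by simp
  by_cases h : f0.length > f1.length
  · rw [if_pos h, if_pos (by rw [hlen]; push_cast; omega)]
    rw [PySem.List.slice_from_natCast]
    exact List.drop_left.symm
  · rw [if_neg h, if_neg (by rw [hlen]; push_cast; omega)]
    rw [PySem.List.slice_to_natCast]
    exact List.take_left.symm
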